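-- pv_equiv track=rewrite | github.com/allenai/papermage | papermage/predictors/utils/vila_utils.py | convert_sequence_tagging_to_spans
-- ===== SOURCE A (Python) =====
-- import itertools
-- from typing import Any, Dict, List, Optional, Sequence, Tuple, Union
--
-- def convert_sequence_tagging_to_spans(
--     token_prediction_sequence: List,
-- ) -> List[Tuple[int, int, int]]:
--     """For a sequence of token predictions, convert them to spans
--     of consecutive same predictions.
--
--     Args:
--         token_prediction_sequence (List)
--
--     Returns:
--         List[Tuple[int, int, int]]: A list of (start, end, label)
--             of consecutive prediction of the same label.
--     """
--     prev_len = 0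
--     spans = []
--     for gp, seq in itertools.groupby(token_prediction_sequence):
--         cur_len = len(list(seq))
--         spans.append((prev_len, prev_len + cur_len, gp))
--         prev_len = prev_len + cur_len
--     return spans
-- ===== SOURCE B (Python) =====
-- def convert_sequence_tagging_to_spans(token_prediction_sequence):
--     seq = token_prediction_sequence
--     if not seq:
--         return []
--     # staged passes: (1) change points via pairwise zip, (2) boundary list, (3) spans
--     changes = [i + 1 for i, (a, b) in enumerate(zip(seq, seq[1:])) if a != b]
--     bounds = [0] + changes + [len(seq)]
--     return [(s, e, seq[s]) for s, e in zip(bounds, bounds[1:])]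
-- ===== Notes on version B (the rewrite author's own statement) =====
-- stated objective: alternative
-- what changed: Replaces the single groupby accumulation pass by three staged comprehensions: change points computed from a pairwise zip of the sequence with its own shift, a boundary list of zero plus the change points plus the length, and spans obtained by zipping consecutive boundaries and looking up the label at each span start.
import Mathlib
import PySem

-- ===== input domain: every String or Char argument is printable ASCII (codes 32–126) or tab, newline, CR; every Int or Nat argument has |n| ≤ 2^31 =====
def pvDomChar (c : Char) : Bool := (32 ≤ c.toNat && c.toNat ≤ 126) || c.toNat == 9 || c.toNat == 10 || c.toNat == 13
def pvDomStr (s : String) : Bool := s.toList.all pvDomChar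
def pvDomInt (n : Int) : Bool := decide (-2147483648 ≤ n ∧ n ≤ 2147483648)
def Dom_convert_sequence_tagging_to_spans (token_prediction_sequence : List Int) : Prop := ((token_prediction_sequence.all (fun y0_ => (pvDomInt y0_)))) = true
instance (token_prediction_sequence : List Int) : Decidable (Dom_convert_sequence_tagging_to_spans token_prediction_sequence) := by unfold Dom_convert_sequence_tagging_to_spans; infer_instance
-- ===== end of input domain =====

-- B replaces the single groupby accumulation pass by three staged comprehensions
-- (change points via a pairwise zip, a boundary list, spans by zipping consecutive
-- boundaries); an alternative decomposition of the same O(n) task.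

-- ===== PORT A =====
-- A iterates over itertools.groupby's (label, run) pairs; each step consumes one maximal
-- run of equal elements, appends its span and advances prev_len by the run's length.
def pvGoA : List Int → Int → List (Int × Int × Int) → List (Int × Int × Int)
  | [], _, spans => spans
  | x :: rest, prev_len, spans =>
    let cur_len : Int := ((rest.takeWhile (· == x)).length : Int) + 1
    pvGoA (rest.dropWhile (· == x)) (prev_len + cur_len)
      (spans ++ [(prev_len, prev_len + cur_len, x)])
  termination_by xs _ _ => xs.length
  decreasing_by
    have := List.length_dropWhile_le (· == x) rest
    simp only [List.length_cons]
    omega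

def convert_sequence_tagging_to_spans (token_prediction_sequence : List Int) :
    List (Int × Int × Int) :=
  pvGoA token_prediction_sequence 0 []

-- ===== PORT B =====
-- B's three comprehensions: change points from enumerate(zip(seq, seq[1:])), the
-- boundary list [0] + changes + [len], spans from zip(bounds, bounds[1:]).
-- seq[s] is ported as (pyGet? …).getD 0: every s in bounds (except the final len) is a
-- valid non-negative index, so the default is never used.
def convert_sequence_tagging_to_spans_alt (token_prediction_sequence : List Int) :
    List (Int × Int × Int) :=
  match token_prediction_sequence with
  | [] => []
  | x :: r =>
    let seq := x :: r
    let changes : List Int :=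
      ((PySem.List.enumerate (seq.zip (PySem.List.slice seq (some 1) none)) 0).filter
        (fun p => p.2.1 != p.2.2)).map (fun p => p.1 + 1)
    let bounds : List Int := (0 :: changes) ++ [(seq.length : Int)]
    (bounds.zip (PySem.List.slice bounds (some 1) none)).map
      (fun p => (p.1, p.2, (PySem.List.pyGet? seq p.1).getD 0))

-- ===== PRECONDITION & SPEC =====
def Spec_convert_sequence_tagging_to_spans (token_prediction_sequence : List Int) (out : List (Int × Int × Int)) : Prop := out = convert_sequence_tagging_to_spans_alt token_prediction_sequence
instance (token_prediction_sequence : List Int) (out : List (Int × Int × Int)) : Decidable (Spec_convert_sequence_tagging_to_spans token_prediction_sequence out) := by unfold Spec_convert_sequence_tagging_to_spans; infer_instance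

-- ===== CLAIM (what is proved, stated in full; the proofs are below) =====
def Claim_equal_convert_sequence_tagging_to_spans : Prop := ∀ (token_prediction_sequence : List Int), Dom_convert_sequence_tagging_to_spans token_prediction_sequence → Spec_convert_sequence_tagging_to_spans token_prediction_sequence (convert_sequence_tagging_to_spans token_prediction_sequence)

-- ===== LEMMAS AND PROOFS =====

-- change positions of a list, element by element: position i is a change point iff the
-- element there differs from its predecessor (prev)
def pvCps : Int → Int → List Int → List Int
  | _, _, [] => []
  | prev, i, y :: t => if y != prev then i :: pvCps y (i + 1) t else pvCps y (i + 1) t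

-- element-wise span builder (reference form shared by both proofs)
def pvE : List Int → Int → Int → Int → List (Int × Int × Int)
  | [], i, start, prev => [(start, i, prev)]
  | y :: t, i, start, prev =>
    if y != prev then (start, i, prev) :: pvE t (i + 1) i y else pvE t (i + 1) start prev

theorem pvGoA_nil (p : Int) (s : List (Int × Int × Int)) : pvGoA [] p s = s := by
  rw [pvGoA]

theorem pvGoA_cons (x : Int) (rest : List Int) (p : Int) (s : List (Int × Int × Int)) :
    pvGoA (x :: rest) p s =
      pvGoA (rest.dropWhile (· == x)) (p + (((rest.takeWhile (· == x)).length : Int) + 1))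
        (s ++ [(p, p + (((rest.takeWhile (· == x)).length : Int) + 1), x)]) := by
  rw [pvGoA]

-- the accumulator of pvGoA is a pure prefix
theorem pvGoA_acc_aux (n : Nat) :
    ∀ (xs : List Int), xs.length ≤ n → ∀ (p : Int) (s : List (Int × Int × Int)),
      pvGoA xs p s = s ++ pvGoA xs p [] := by
  induction n with
  | zero =>
    intro xs h p s
    have hx : xs = [] := List.eq_nil_of_length_eq_zero (Nat.le_zero.mp h)
    subst hx; simp [pvGoA_nil]
  | succ n ih =>
    intro xs h p s
    cases xs with
    | nil => simp [pvGoA_nil]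
    | cons x rest =>
      rw [pvGoA_cons, pvGoA_cons]
      have hlen : (rest.dropWhile (· == x)).length ≤ n := by
        have := List.length_dropWhile_le (· == x) rest
        simp only [List.length_cons] at h
        omega
      rw [ih _ hlen, ih _ hlen _ ([] ++ _)]
      simp

theorem pvGoA_acc (xs : List Int) (p : Int) (s : List (Int × Int × Int)) :
    pvGoA xs p s = s ++ pvGoA xs p [] :=
  pvGoA_acc_aux xs.length xs le_rfl p s

-- B's element-wise reference form equals A's run-wise recursion
theorem pvE_eq_pvGoA (t : List Int) (i start prev : Int) :
    pvE t i start prev =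
      (start, i + ((t.takeWhile (· == prev)).length : Int), prev) ::
        pvGoA (t.dropWhile (· == prev)) (i + ((t.takeWhile (· == prev)).length : Int)) [] := by
  induction t generalizing i start prev with
  | nil => simp [pvE, pvGoA_nil]
  | cons y t' ih =>
    by_cases h : y = prev
    · subst h
      simp only [pvE, List.takeWhile, List.dropWhile, beq_self_eq_true, bne_self_eq_false,
        Bool.false_eq_true, if_false, List.length_cons]
      rw [ih]
      have : i + (((t'.takeWhile (· == y)).length : Nat) + 1 : Nat) =
          (i + 1) + ((t'.takeWhile (· == y)).length : Int) := by push_cast; ring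
      rw [this]
    · have hne : (y == prev) = false := by simp [h]
      simp only [pvE, List.takeWhile, List.dropWhile, hne, bne, Bool.not_false, if_true,
        List.length_nil, Int.natCast_zero, add_zero]
      rw [ih, pvGoA_cons, pvGoA_acc _ _ ([] ++ _)]
      simp only [List.nil_append, List.singleton_append]
      have harr : i + 1 + ((t'.takeWhile (· == y)).length : Int) =
          i + (((t'.takeWhile (· == y)).length : Int) + 1) := by ring
      rw [harr]

-- B's change-point comprehension computes pvCps
theorem pvChanges_eq_cps (t : List Int) (x : Int) (n : Int) :
    (((PySem.List.enumerate ((x :: t).zip t) n).filter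
        (fun p => p.2.1 != p.2.2)).map (fun p => p.1 + 1)) = pvCps x (n + 1) t := by
  induction t generalizing x n with
  | nil => simp [pvCps, PySem.List.enumerate_nil]
  | cons y t' ih =>
    simp only [List.zip_cons_cons, PySem.List.enumerate_cons]
    by_cases h : x = y
    · subst h
      rw [List.filter_cons_of_neg (by simp), ih x (n + 1)]
      simp [pvCps]
    · have h2 : (y != x) = true := by simp [Ne.symm h]
      rw [List.filter_cons_of_pos (by simp [h]), List.map_cons, ih y (n + 1)]
      simp [pvCps, h2]

-- main B lemma: mapping over consecutive boundary pairs equals the element-wise builder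
theorem pvBounds_map_eq_pvE (t : List Int) (prev : Int) (i start : Nat) (full : List Int)
    (hlen : full.length = i + t.length)
    (hdrop : full.drop i = t)
    (hstart : full[start]? = some prev) :
    ((((start : Int) :: pvCps prev (i : Int) t ++ [(full.length : Int)]).zip
        (pvCps prev (i : Int) t ++ [(full.length : Int)])).map
      (fun p => (p.1, p.2, (PySem.List.pyGet? full p.1).getD 0))) = pvE t (i : Int) (start : Int) prev := by
  induction t generalizing prev i start with
  | nil =>
    simp only [pvCps, List.nil_append, List.length_nil, Nat.add_zero] at *
    simp [pvE, PySem.List.pyGet?_natCast, hstart, hlen]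
  | cons y t' ih =>
    have hy : full[i]? = some y := by
      have h0 : (full.drop i)[0]? = some y := by rw [hdrop]; rfl
      simpa [List.getElem?_drop] using h0
    have hlen' : full.length = (i + 1) + t'.length := by
      simp only [List.length_cons] at hlen; omega
    have hdrop' : full.drop (i + 1) = t' := by
      simpa [List.drop_drop, Nat.add_comm i 1] using congrArg (List.drop 1) hdrop
    by_cases h : y = prev
    · subst h
      have hb : (y != y) = false := by simp
      simp only [pvCps, pvE, hb, Bool.false_eq_true, if_false]
      have hih := ih y (i + 1) start hlen' hdrop' hstart
      push_cast at hih ⊢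
      exact hih
    · have hb : (y != prev) = true := by simp [h]
      simp only [pvCps, pvE, hb, if_true]
      have hih := ih y (i + 1) i hlen' hdrop' hy
      push_cast at hih ⊢
      simp only [List.cons_append, List.zip_cons_cons, List.map_cons]
      rw [show pvE t' ((i:Int) + 1) (i:Int) y = List.map (fun p => (p.1, p.2, (PySem.List.pyGet? full p.1).getD 0))
          (((i:Int) :: pvCps y ((i:Int) + 1) t' ++ [(full.length:Int)]).zip (pvCps y ((i:Int) + 1) t' ++ [(full.length:Int)])) from hih.symm]
      simp [PySem.List.pyGet?_natCast, hstart]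

theorem convert_sequence_tagging_to_spans_spec : Claim_equal_convert_sequence_tagging_to_spans := by
  intro xs _
  unfold Spec_convert_sequence_tagging_to_spans
  cases xs with
  | nil => simp [convert_sequence_tagging_to_spans, convert_sequence_tagging_to_spans_alt, pvGoA_nil]
  | cons x r =>
    show pvGoA (x :: r) 0 [] = convert_sequence_tagging_to_spans_alt (x :: r)
    simp only [convert_sequence_tagging_to_spans_alt, PySem.List.slice_from_one,
      List.tail_cons, List.cons_append]
    rw [pvChanges_eq_cps r x 0]
    have hmain := pvBounds_map_eq_pvE r x 1 0 (x :: r)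
      (by simp [List.length_cons]; omega) (by simp) (by simp)
    push_cast at hmain
    norm_num at hmain ⊢
    rw [hmain, pvE_eq_pvGoA, pvGoA_cons, pvGoA_acc _ _ ([] ++ _)]
    simp only [List.nil_append, List.singleton_append, zero_add]
    norm_num [add_comm]
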